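-- pv_equiv track=rewrite | github.com/HarshaanNiles010/python-test-suite | solutions/sorting_task_solution.py | task_8
-- ===== SOURCE A (Python) =====
-- from typing import List, Tuple, Callable
--
-- def task_8(arr: List[int]) -> Tuple[List[int], int]:
--     """
--         Implement insertion sort and count the number of comparisons made.
--         A comparison occurs each time two elements are compared.
--         Return a tuple of (sorted_list, comparison_count).
--         Sort in ascending order. Do not modify the original list.
--     """
--     result = arr[:]
--     comparisons = 0
--     for i in range(1, len(result)):
--         key = result[i]
--         j = i - 1
--         while j >= 0:
--             comparisons += 1
--             if result[j] > key:
--                 result[j + 1] = result[j]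
--                 j -= 1
--             else:
--                 break
--         result[j + 1] = key
--     return result, comparisons
-- ===== SOURCE B (Python) =====
-- from typing import List, Tuple
--
-- def task_8(arr: List[int]) -> Tuple[List[int], int]:
--     # Faster re-implementation: sorted() for the list; comparison count =
--     # inversions (merge-sort count, O(n log n)) + one prefix-minimum pass
--     # (insertion sort compares shifts(=inversions with earlier elements) plus
--     # one extra "break" comparison whenever some earlier element is <= key).
--     def msort(xs):
--         if len(xs) <= 1:
--             return xs, 0
--         m = len(xs) // 2
--         L, a = msort(xs[:m])
--         R, b = msort(xs[m:])
--         merged = []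
--         inv = 0
--         i = j = 0
--         while i < len(L) and j < len(R):
--             if L[i] <= R[j]:
--                 merged.append(L[i]); i += 1
--             else:
--                 merged.append(R[j]); inv += len(L) - i; j += 1
--         merged += L[i:]
--         merged += R[j:]
--         return merged, a + b + inv
--
--     comps = msort(arr)[1]
--     if arr:
--         mn = arr[0]
--         for x in arr[1:]:
--             if mn <= x:
--                 comps += 1
--             mn = min(mn, x)
--     return sorted(arr), comps
-- ===== Notes on version B (the rewrite author's own statement) =====
-- stated objective: faster
-- what changed: Replaces the quadratic shifting insertion-sort loop by sorted() for the list and computes the comparison count in O(n log n) as merge-sort-counted inversions plus a prefix-minimum pass that adds the one extra 'break' comparison per element.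
import Mathlib
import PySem

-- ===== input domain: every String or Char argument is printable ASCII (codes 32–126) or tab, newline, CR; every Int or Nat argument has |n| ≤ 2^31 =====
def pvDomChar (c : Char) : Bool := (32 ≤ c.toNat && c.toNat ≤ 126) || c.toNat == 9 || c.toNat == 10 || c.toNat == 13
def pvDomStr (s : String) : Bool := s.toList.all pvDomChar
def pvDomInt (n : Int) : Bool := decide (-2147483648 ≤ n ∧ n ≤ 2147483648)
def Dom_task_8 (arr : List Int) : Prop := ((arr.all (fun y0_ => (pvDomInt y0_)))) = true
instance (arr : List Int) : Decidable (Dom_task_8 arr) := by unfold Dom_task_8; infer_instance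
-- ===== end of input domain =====

-- B changes the algorithm: sorted list via a library sort and the comparison count via
-- merge-sort inversion counting plus a prefix-minimum pass (O(n log n) instead of A's O(n^2)).

-- ===== PORT A =====
-- the inner 'while j >= 0' loop; the Nat argument is Python's j+1 (so 0 means j = -1).
-- All indices are in range on every reachable call, so getD/set are exact for result[j] / result[j+1]=…
def task8innerA : List Int → Int → Nat → Int → List Int × Nat × Int
  | result, _,   0,     comps => (result, 0, comps)
  | result, key, j + 1, comps =>
    if result.getD j 0 > key then
      task8innerA (result.set (j + 1) (result.getD j 0)) key j (comps + 1)
    else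
      (result, j + 1, comps + 1)

-- for i in range(1, len(result)): exact as List.range' 1 (n - 1)
def task_8 (arr : List Int) : List Int × Int :=
  (List.range' 1 (arr.length - 1)).foldl
    (fun st i =>
      let key := st.1.getD i 0
      let r := task8innerA st.1 key i st.2
      (r.1.set r.2.1 key, r.2.2))
    (arr, 0)

-- ===== PORT B =====
-- the merge loop of Source B (index-based while + tail appends), as structural recursion on the two lists
def task8merge : List Int → List Int → List Int × Int
  | [], r => (r, 0)
  | a :: l, [] => (a :: l, 0)
  | a :: l, b :: r =>
    if a ≤ b then
      let p := task8merge l (b :: r)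
      (a :: p.1, p.2)
    else
      let p := task8merge (a :: l) r
      (b :: p.1, p.2 + ((a :: l).length : Int))
termination_by l r => l.length + r.length

-- msort of Source B; xs[:m] / xs[m:] with m = len(xs)//2 are exactly take/drop of a Nat index
def task8msort (xs : List Int) : List Int × Int :=
  if _h : xs.length ≤ 1 then (xs, 0)
  else
    let m := xs.length / 2
    let p := task8msort (xs.take m)
    let q := task8msort (xs.drop m)
    let r := task8merge p.1 q.1
    (r.1, p.2 + q.2 + r.2)
termination_by xs.length
decreasing_by
  · simp [List.length_take]; omega
  · simp [List.length_drop]; omega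

def task_8_alt (arr : List Int) : List Int × Int :=
  let sorted_list := PySem.List.sorted arr (fun x => x) false
  let inv := (task8msort arr).2
  let comps :=
    match arr with
    | [] => inv
    | a0 :: rest =>
      (rest.foldl (fun (st : Int × Int) x =>
        (min st.1 x, if st.1 ≤ x then st.2 + 1 else st.2)) (a0, inv)).2
  (sorted_list, comps)

-- ===== PRECONDITION & SPEC =====
def Spec_task_8 (arr : List Int) (out : List Int × Int) : Prop := out = task_8_alt arr
instance (arr : List Int) (out : List Int × Int) : Decidable (Spec_task_8 arr out) := by unfold Spec_task_8; infer_instance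

-- ===== CLAIM (what is proved, stated in full; the proofs are below) =====
def Claim_equal_task_8 : Prop := ∀ (arr : List Int), Dom_task_8 arr → Spec_task_8 arr (task_8 arr)

-- ===== LEMMAS AND PROOFS =====

-- insertion of k into a sorted prefix s (after all elements ≤ k)
def task8ins (s : List Int) (k : Int) : List Int :=
  s.take (s.countP (fun y => decide (y ≤ k))) ++ k :: s.drop (s.countP (fun y => decide (y ≤ k)))

-- comparisons A makes while inserting k into (a permutation of) the prefix p
def task8stepC (p : List Int) (k : Int) : Int :=
  (p.countP (fun y => decide (k < y)) : Int) +
    (if 0 < p.countP (fun y => decide (y ≤ k)) then 1 else 0)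

-- the functional left-fold insertion sort that A's loop implements
def task8F (st : List Int × Int) (x : Int) : List Int × Int :=
  (task8ins st.1 x, st.2 + task8stepC st.1 x)

-- inversion count (head-recursive spec)
def task8I : List Int → Int
  | [] => 0
  | x :: xs => (xs.countP (fun y => decide (y < x)) : Int) + task8I xs

-- cross inversions: for each (later) element x of l, the elements of p greater than x
def task8cross (p l : List Int) : Int :=
  (l.map (fun x => (p.countP (fun y => decide (x < y)) : Int))).sum

-- A's comparison total over a prefix p and remaining elements l
def task8Tc : List Int → List Int → Int → Int
  | _, [], c => c
  | p, x :: l, c => task8Tc (p ++ [x]) l (c + task8stepC p x)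

def task8X : List Int → List Int → Int
  | _, [] => 0
  | p, x :: l => (p.countP (fun y => decide (x < y)) : Int) + task8X (p ++ [x]) l

def task8Y : List Int → List Int → Int
  | _, [] => 0
  | p, x :: l => (if 0 < p.countP (fun y => decide (y ≤ x)) then 1 else 0) + task8Y (p ++ [x]) l

lemma task8ins_length (s : List Int) (k : Int) : (task8ins s k).length = s.length + 1 := by
  simp [task8ins]

lemma task8ins_perm (s : List Int) (k : Int) : (task8ins s k).Perm (k :: s) := by
  unfold task8ins
  refine List.perm_middle.trans ?_
  rw [List.take_append_drop]

lemma task8ins_sorted (s : List Int) (k : Int) (hs : s.Pairwise (· ≤ ·)) :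
    (task8ins s k).Pairwise (· ≤ ·) := by
  induction s with
  | nil => simp [task8ins]
  | cons y t ih =>
    rcases List.pairwise_cons.mp hs with ⟨hy, ht⟩
    by_cases hyk : y ≤ k
    · have he : task8ins (y :: t) k = y :: task8ins t k := by
        simp [task8ins, hyk]
      rw [he]
      refine List.pairwise_cons.mpr ⟨?_, ih ht⟩
      intro z hz
      have hz' : z ∈ k :: t := (task8ins_perm t k).mem_iff.mp hz
      rcases List.mem_cons.mp hz' with rfl | hz'
      · exact hyk
      · exact hy z hz'
    · have hm : (y :: t).countP (fun y => decide (y ≤ k)) = 0 := by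
        refine List.countP_eq_zero.mpr ?_
        intro a ha
        simp at ha ⊢
        rcases ha with rfl | ha
        · omega
        · have := hy a ha; omega
      have he : task8ins (y :: t) k = k :: y :: t := by
        simp [task8ins, hm]
      rw [he]
      refine List.pairwise_cons.mpr ⟨?_, hs⟩
      intro z hz
      simp at hz
      rcases hz with rfl | hz
      · omega
      · have := hy z hz; omega

-- the inner while-loop followed by the final write result[j+1] = key
lemma task8inner_set (s : List Int) (key r0 : Int) (rest : List Int) (comps : Int)
    (hs : s.Pairwise (· ≤ ·)) :
    ((task8innerA (s ++ r0 :: rest) key s.length comps).1.set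
        (task8innerA (s ++ r0 :: rest) key s.length comps).2.1 key,
      (task8innerA (s ++ r0 :: rest) key s.length comps).2.2)
      = (task8ins s key ++ rest, comps + task8stepC s key) := by
  induction s using List.reverseRecOn generalizing r0 rest comps with
  | nil =>
    simp [task8innerA, task8ins, task8stepC]
  | append_singleton t a ih =>
    obtain ⟨pt, -, hcross⟩ := List.pairwise_append.mp hs
    have hta : ∀ x ∈ t, x ≤ a := fun x hx => hcross x hx a (by simp)
    have hassoc : (t ++ [a]) ++ r0 :: rest = t ++ a :: r0 :: rest := by simp
    have hget : (t ++ a :: r0 :: rest).getD t.length 0 = a := by simp [List.getD]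
    have hlen : (t ++ [a]).length = t.length + 1 := by simp
    rw [hassoc, hlen]
    simp only [task8innerA, hget]
    by_cases hak : a > key
    · rw [if_pos (by simpa using hak)]
      have hset : (t ++ a :: r0 :: rest).set (t.length + 1) a = t ++ a :: a :: rest := by
        have : (t ++ a :: r0 :: rest).set (t.length + 1) a
            = t ++ (a :: r0 :: rest).set 1 a := by
          simp
        rw [this]; rfl
      rw [hset]
      have hih := ih a (a :: rest) (comps + 1) pt
      rw [hih]
      simp only [Prod.mk.injEq]
      have hm : (t ++ [a]).countP (fun y => decide (y ≤ key)) = t.countP (fun y => decide (y ≤ key)) := by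
        simp [List.countP_append]
        omega
      have hmle : t.countP (fun y => decide (y ≤ key)) ≤ t.length := List.countP_le_length
      constructor
      · unfold task8ins
        rw [hm, List.take_append_of_le_length hmle, List.drop_append_of_le_length hmle]
        simp
      · unfold task8stepC
        rw [hm]
        have : (t ++ [a]).countP (fun y => decide (key < y)) = t.countP (fun y => decide (key < y)) + 1 := by
          simp [List.countP_append]
          omega
        rw [this]
        push_cast
        ring
    · rw [if_neg (by simpa using hak)]
      have hm : (t ++ [a]).countP (fun y => decide (y ≤ key)) = t.length + 1 := by
        have hall : ∀ y ∈ t ++ [a], (fun y => decide (y ≤ key)) y = true := by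
          intro y hy
          rcases List.mem_append.mp hy with hy | hy
          · have h1 := hta y hy; simp; omega
          · simp at hy; subst hy; simp; omega
        have := List.countP_eq_length.mpr hall
        simpa using this
      have hz : (t ++ [a]).countP (fun y => decide (key < y)) = 0 := by
        refine List.countP_eq_zero.mpr ?_
        intro y hy
        rcases List.mem_append.mp hy with hy | hy
        · have h1 := hta y hy; simp; omega
        · simp at hy; subst hy; simp; omega
      have hset : (t ++ a :: r0 :: rest).set (t.length + 1) key = t ++ a :: key :: rest := by
        have : (t ++ a :: r0 :: rest).set (t.length + 1) key
            = t ++ (a :: r0 :: rest).set 1 key := by simp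
        rw [this]; rfl
      rw [hset]
      simp only [Prod.mk.injEq]
      constructor
      · unfold task8ins
        rw [hm]
        have h1 : (t ++ [a]).take (t.length + 1) = t ++ [a] := by
          apply List.take_of_length_le; simp
        have h2 : (t ++ [a]).drop (t.length + 1) = [] := by
          apply List.drop_eq_nil_of_le; simp
        rw [h1, h2]
        simp
      · unfold task8stepC
        rw [hm, hz]
        simp

-- the outer for-loop, peeled against the functional fold
lemma task8outer (suffix : List Int) : ∀ (s : List Int) (c : Int), s.Pairwise (· ≤ ·) →
    (List.range' s.length suffix.length).foldl
      (fun st i =>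
        let key := st.1.getD i 0
        let r := task8innerA st.1 key i st.2
        (r.1.set r.2.1 key, r.2.2))
      (s ++ suffix, c)
    = suffix.foldl task8F (s, c) := by
  induction suffix with
  | nil => intro s c hs; simp
  | cons x suffix ih =>
    intro s c hs
    have hget : (s ++ x :: suffix).getD s.length 0 = x := by simp [List.getD]
    have hstep := task8inner_set s x x suffix c hs
    simp only [List.length_cons, List.range'_succ, List.foldl_cons, hget]
    rw [hstep]
    rw [show s.length + 1 = (task8ins s x).length from (task8ins_length s x).symm]
    exact ih (task8ins s x) (c + task8stepC s x) (task8ins_sorted s x hs)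

lemma task8_eq_fold (arr : List Int) : task_8 arr = arr.foldl task8F ([], 0) := by
  cases arr with
  | nil => rfl
  | cons a rest =>
    unfold task_8
    have hl : (a :: rest).length - 1 = rest.length := by simp
    rw [hl]
    have h0 := task8outer rest [a] 0 (by simp)
    simp only [List.length_singleton, List.singleton_append] at h0
    rw [h0]
    have hF : task8F ([], 0) a = ([a], 0) := by
      simp [task8F, task8ins, task8stepC]
    rw [List.foldl_cons, hF]

lemma task8fold_sorted_perm (l : List Int) : ∀ (s : List Int) (c : Int), s.Pairwise (· ≤ ·) →
    (l.foldl task8F (s, c)).1.Pairwise (· ≤ ·) ∧ (l.foldl task8F (s, c)).1.Perm (s ++ l) := by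
  induction l with
  | nil => intro s c hs; exact ⟨hs, by simp⟩
  | cons x l ih =>
    intro s c hs
    simp only [List.foldl_cons]
    have h := ih (task8ins s x) (c + task8stepC s x) (task8ins_sorted s x hs)
    refine ⟨h.1, h.2.trans ?_⟩
    have h1 : (task8ins s x ++ l).Perm ((x :: s) ++ l) := (task8ins_perm s x).append_right l
    exact h1.trans List.perm_middle.symm

lemma task8fold_count (l : List Int) : ∀ (s p : List Int) (c : Int), s.Pairwise (· ≤ ·) →
    s.Perm p → (l.foldl task8F (s, c)).2 = task8Tc p l c := by
  induction l with
  | nil => intro s p c _ _; simp [task8Tc]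
  | cons x l ih =>
    intro s p c hs hp
    simp only [List.foldl_cons]
    have hstep : task8stepC s x = task8stepC p x := by
      unfold task8stepC; rw [hp.countP_eq, hp.countP_eq]
    have hins : (task8ins s x).Perm (p ++ [x]) := by
      refine (task8ins_perm s x).trans ?_
      exact (hp.cons x).trans (List.perm_append_singleton x p).symm
    have h := ih (task8ins s x) (p ++ [x]) (c + task8stepC s x)
      (task8ins_sorted s x hs) hins
    rw [task8Tc, ← hstep]
    exact h

lemma task8Tc_split (l : List Int) : ∀ (p : List Int) (c : Int),
    task8Tc p l c = c + task8X p l + task8Y p l := by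
  induction l with
  | nil => intro p c; simp [task8Tc, task8X, task8Y]
  | cons x l ih =>
    intro p c
    rw [task8Tc, task8X, task8Y, ih, task8stepC]
    ring

lemma task8I_snoc (p : List Int) (k : Int) :
    task8I (p ++ [k]) = task8I p + (p.countP (fun y => decide (k < y)) : Int) := by
  induction p with
  | nil => simp [task8I]
  | cons x p ih =>
    simp only [List.cons_append, task8I, ih, List.countP_append, List.countP_cons,
      List.countP_nil]
    split_ifs <;> push_cast <;> omega

lemma task8X_I (l : List Int) : ∀ (p : List Int),
    task8I (p ++ l) = task8I p + task8X p l := by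
  induction l with
  | nil => intro p; simp [task8X]
  | cons x l ih =>
    intro p
    have h1 : p ++ x :: l = (p ++ [x]) ++ l := by simp
    rw [h1, ih (p ++ [x]), task8I_snoc, task8X]
    ring

lemma task8X_cross (l : List Int) : ∀ (p : List Int),
    task8X p l = task8I l + task8cross p l := by
  induction l with
  | nil => intro p; simp [task8X, task8I, task8cross]
  | cons x l ih =>
    intro p
    have hc : task8cross (p ++ [x]) l = task8cross p l + (l.countP (fun y => decide (y < x)) : Int) := by
      unfold task8cross
      have h1 : (l.map (fun z => ((p ++ [x]).countP (fun y => decide (z < y)) : Int))).sum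
          = (l.map (fun z => (p.countP (fun y => decide (z < y)) : Int)
              + (if (fun z => decide (z < x)) z = true then 1 else 0))).sum := by
        refine congrArg List.sum (List.map_congr_left ?_)
        intro z _
        simp only [List.countP_append, List.countP_cons, List.countP_nil]
        push_cast
        split_ifs <;> omega
      rw [h1, PySem.List.sum_map_add_int, PySem.List.sum_map_ite_one_zero]
    rw [task8X, ih (p ++ [x]), hc, task8I]
    have : task8cross p (x :: l) = (p.countP (fun y => decide (x < y)) : Int) + task8cross p l := by
      simp [task8cross]
    rw [this]; ring

lemma task8I_append (A B : List Int) :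
    task8I (A ++ B) = task8I A + task8I B + task8cross A B := by
  rw [task8X_I B A, task8X_cross B A]; ring

lemma task8cross_perm_left {p p' : List Int} (l : List Int) (h : p.Perm p') :
    task8cross p l = task8cross p' l := by
  unfold task8cross
  congr 1
  refine List.map_congr_left ?_
  intro x _
  rw [h.countP_eq]

lemma task8cross_perm_right {l l' : List Int} (p : List Int) (h : l.Perm l') :
    task8cross p l = task8cross p l' := by
  exact (h.map _).sum_eq

lemma task8merge_spec : ∀ (L R : List Int), L.Pairwise (· ≤ ·) → R.Pairwise (· ≤ ·) →
    (task8merge L R).1.Pairwise (· ≤ ·) ∧ (task8merge L R).1.Perm (L ++ R) ∧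
      (task8merge L R).2 = task8cross L R := by
  intro L R
  fun_induction task8merge L R with
  | case1 r =>
    intro _ hR
    refine ⟨hR, by simp, ?_⟩
    simp [task8cross]
  | case2 a l =>
    intro hL _
    exact ⟨hL, by simp, by simp [task8cross]⟩
  | case3 a l b r h p ih =>
    intro hL hR
    obtain ⟨hal, hlt⟩ := List.pairwise_cons.mp hL
    obtain ⟨hs, hp, hi⟩ := ih hlt hR
    refine ⟨?_, ?_, ?_⟩
    · refine List.pairwise_cons.mpr ⟨?_, hs⟩
      intro z hz
      have hz' : z ∈ l ++ b :: r := hp.mem_iff.mp hz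
      rcases List.mem_append.mp hz' with hz' | hz'
      · exact hal z hz'
      · rcases List.mem_cons.mp hz' with rfl | hz'
        · exact h
        · exact le_trans h ((List.pairwise_cons.mp hR).1 z hz')
    · exact hp.cons a
    · rw [hi]
      unfold task8cross
      refine congrArg List.sum (List.map_congr_left ?_)
      intro z hz
      have hza : ¬ (z < a) := by
        rcases List.mem_cons.mp hz with rfl | hz'
        · omega
        · have := (List.pairwise_cons.mp hR).1 z hz'; omega
      simp [hza]
  | case4 a l b r h p ih =>
    intro hL hR
    obtain ⟨hbr, hrt⟩ := List.pairwise_cons.mp hR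
    obtain ⟨hs, hp, hi⟩ := ih hL hrt
    have hba : b < a := by omega
    refine ⟨?_, ?_, ?_⟩
    · refine List.pairwise_cons.mpr ⟨?_, hs⟩
      intro z hz
      have hz' : z ∈ (a :: l) ++ r := hp.mem_iff.mp hz
      rcases List.mem_append.mp hz' with hz' | hz'
      · rcases List.mem_cons.mp hz' with rfl | hz'
        · omega
        · have := (List.pairwise_cons.mp hL).1 z hz'; omega
      · exact hbr z hz'
    · exact (hp.cons b).trans List.perm_middle.symm
    · rw [hi]
      have hcnt : (a :: l).countP (fun y => decide (b < y)) = (a :: l).length := by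
        refine List.countP_eq_length.mpr ?_
        intro y hy
        rcases List.mem_cons.mp hy with rfl | hy
        · simpa using hba
        · have := (List.pairwise_cons.mp hL).1 y hy
          simp; omega
      have : task8cross (a :: l) (b :: r) = ((a :: l).countP (fun y => decide (b < y)) : Int) + task8cross (a :: l) r := by
        simp [task8cross]
      rw [this, hcnt]
      ring

lemma task8msort_spec : ∀ (xs : List Int),
    (task8msort xs).1.Pairwise (· ≤ ·) ∧ (task8msort xs).1.Perm xs ∧
      (task8msort xs).2 = task8I xs := by
  intro xs
  fun_induction task8msort xs with
  | case1 xs h =>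
    rcases xs with _ | ⟨x, _ | ⟨y, t⟩⟩
    · simp [task8I]
    · simp [task8I]
    · simp at h
  | case2 xs h m p q r ih1 ih2 =>
    obtain ⟨hps, hpp, hpi⟩ := ih1
    obtain ⟨hqs, hqp, hqi⟩ := ih2
    obtain ⟨hms, hmp, hmi⟩ := task8merge_spec p.1 q.1 hps hqs
    refine ⟨hms, ?_, ?_⟩
    · refine hmp.trans ?_
      refine ((hpp.append hqp).trans ?_)
      rw [List.take_append_drop]
    · rw [hmi]
      have hc : task8cross p.1 q.1 = task8cross (xs.take m) (xs.drop m) := by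
        rw [task8cross_perm_left _ hpp, task8cross_perm_right _ hqp]
      have hI := task8I_append (xs.take m) (xs.drop m)
      rw [List.take_append_drop] at hI
      rw [hpi, hqi, hc]
      omega

lemma task8bonus_loop (rest : List Int) : ∀ (p : List Int) (mn c : Int), mn ∈ p →
    (∀ y ∈ p, mn ≤ y) →
    (rest.foldl (fun (st : Int × Int) x =>
        (min st.1 x, if st.1 ≤ x then st.2 + 1 else st.2)) (mn, c)).2
      = c + task8Y p rest := by
  induction rest with
  | nil => intro p mn c _ _; simp [task8Y]
  | cons x rest ih =>
    intro p mn c hmem hlb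
    simp only [List.foldl_cons]
    have hmem' : min mn x ∈ p ++ [x] := by
      rcases le_total mn x with h | h
      · rw [min_eq_left h]; exact List.mem_append_left _ hmem
      · rw [min_eq_right h]; exact List.mem_append_right _ (by simp)
    have hlb' : ∀ y ∈ p ++ [x], min mn x ≤ y := by
      intro y hy
      rcases List.mem_append.mp hy with hy | hy
      · exact le_trans (min_le_left _ _) (hlb y hy)
      · simp at hy; subst hy; exact min_le_right _ _
    have h := ih (p ++ [x]) (min mn x) (if mn ≤ x then c + 1 else c) hmem' hlb'
    rw [h, task8Y]
    have hiff : (mn ≤ x) ↔ 0 < p.countP (fun y => decide (y ≤ x)) := by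
      constructor
      · intro hx
        exact List.countP_pos_iff.mpr ⟨mn, hmem, by simpa using hx⟩
      · intro hx
        rcases List.countP_pos_iff.mp hx with ⟨y, hy, hyx⟩
        simp at hyx
        exact le_trans (hlb y hy) hyx
    by_cases hx : mn ≤ x
    · rw [if_pos hx, if_pos (hiff.mp hx)]; ring
    · rw [if_neg hx, if_neg (fun hc => hx (hiff.mpr hc))]; ring

lemma task8_main (arr : List Int) : task_8 arr = task_8_alt arr := by
  obtain ⟨hsorted, hperm⟩ := task8fold_sorted_perm arr [] 0 (by simp)
  simp only [List.nil_append] at hperm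
  have h1 : (arr.foldl task8F ([], 0)).1 = PySem.List.sorted arr (fun x => x) false :=
    (PySem.List.sorted_id_eq_of_perm_of_pairwise _ _ hperm hsorted).symm
  have h2 : (arr.foldl task8F ([], 0)).2 = task8I arr + task8Y [] arr := by
    rw [task8fold_count arr [] [] 0 (by simp) (by simp), task8Tc_split]
    have hx := task8X_I arr []
    simp only [List.nil_append, task8I] at hx
    omega
  have hmi : (task8msort arr).2 = task8I arr := (task8msort_spec arr).2.2
  rw [task8_eq_fold]
  unfold task_8_alt
  cases arr with
  | nil =>
    simp only []
    refine Prod.ext ?_ ?_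
    · rw [h1]
    · rw [h2, hmi]
      simp [task8Y, task8I]
  | cons a rest =>
    simp only []
    refine Prod.ext ?_ ?_
    · rw [h1]
    · rw [h2]
      have hb := task8bonus_loop rest [a] a ((task8msort (a :: rest)).2) (by simp)
        (by intro y hy; simp at hy; omega)
      rw [hb, hmi]
      have hy0 : task8Y [] (a :: rest) = task8Y [a] rest := by
        simp [task8Y]
      rw [hy0]

-- ===== VERDICT (by name: the statement is the Claim_ definition above) =====
theorem task_8_spec : Claim_equal_task_8 := by
  intro arr _
  unfold Spec_task_8
  exact task8_main arr
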